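-- pv_equiv track=rewrite | github.com/tkarani1/compgenome-hw4 | hw4q2.py | make_prefix_kmer_table
-- ===== SOURCE A (Python) =====
-- def make_prefix_kmer_table(seqs, k):
--     """ Given read dictionary and integer k, return a dictionary that
--         maps each k-mer to the set of names of reads containing the k-mer. """
--     table = {}
--     for name, seq in seqs.items():
--        kmer_first = seq[0:0+k]
--
--        if kmer_first not in table:
--             table[kmer_first] = set()
--        table[kmer_first].add(name)
--
--     return table
-- ===== SOURCE B (Python) =====
-- def make_prefix_kmer_table(seqs, k):
--     """ Given read dictionary and integer k, return a dictionary that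
--         maps each k-mer to the set of names of reads containing the k-mer. """
--     prefixes = list(dict.fromkeys(seq[0:k] for seq in seqs.values()))
--     return {p: {name for name, seq in seqs.items() if seq[0:k] == p}
--             for p in prefixes}
-- ===== Notes on version B (the rewrite author's own statement) =====
-- stated objective: alternative
-- what changed: Replaces the single-pass hash-insert loop (create-set-if-absent, then add name) with a two-pass group-by: an ordered dedup pass collects the distinct prefixes, then a dict comprehension builds each prefix's name set by filtering the reads.
import Mathlib
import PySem

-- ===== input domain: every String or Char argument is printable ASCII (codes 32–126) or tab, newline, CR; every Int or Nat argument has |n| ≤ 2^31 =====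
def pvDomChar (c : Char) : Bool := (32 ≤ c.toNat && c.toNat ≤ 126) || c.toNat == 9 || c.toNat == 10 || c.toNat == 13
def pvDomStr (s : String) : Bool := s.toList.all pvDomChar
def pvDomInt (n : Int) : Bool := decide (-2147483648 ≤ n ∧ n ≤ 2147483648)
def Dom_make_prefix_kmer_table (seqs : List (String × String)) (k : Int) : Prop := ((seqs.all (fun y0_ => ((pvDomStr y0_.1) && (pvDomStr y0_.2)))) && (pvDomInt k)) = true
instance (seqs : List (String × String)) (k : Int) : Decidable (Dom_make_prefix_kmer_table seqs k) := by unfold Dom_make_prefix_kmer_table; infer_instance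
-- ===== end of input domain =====

-- B replaces A's single-pass hash-insert loop with a two-pass group-by (ordered prefix dedup, then a per-prefix filter); alternative decomposition, return values proved equal.


-- ===== PORT A =====
-- literal port of A: one pass over seqs.items(); 'seq[0:0+k]' is Str.slice; then
-- 'if kmer_first not in table: table[kmer_first] = set()' and 'table[kmer_first].add(name)'
def make_prefix_kmer_table (seqs : List (String × String)) (k : Int) : List (String × List String) :=
  (seqs.foldl (fun table nv =>
      let kmer_first := PySem.Str.slice nv.2 (some 0) (some (0 + k))
      let table :=
        if table.contains kmer_first then table
        else table.insert kmer_first PySem.Set.empty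
      table.insert kmer_first (PySem.Set.add (table.getD kmer_first PySem.Set.empty) nv.1))
    PySem.Dict.empty).items

-- ===== PORT B =====
-- literal port of B: 'prefixes = list(dict.fromkeys(seq[0:k] for seq in seqs.values()))' is PySem.List.dedup
-- of the mapped prefixes; then the dict comprehension '{p: {name for name, seq in seqs.items() if seq[0:k] == p} for p in prefixes}'
def make_prefix_kmer_table_alt (seqs : List (String × String)) (k : Int) : List (String × List String) :=
  let prefixes := PySem.List.dedup (seqs.map (fun nv => PySem.Str.slice nv.2 (some 0) (some k)))
  prefixes.map (fun p =>
    (p, PySem.Set.ofList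
          ((seqs.filter (fun nv => PySem.Str.slice nv.2 (some 0) (some k) == p)).map (fun nv => nv.1))))

-- ===== PRECONDITION & SPEC =====
def Spec_make_prefix_kmer_table (seqs : List (String × String)) (k : Int) (out : List (String × List String)) : Prop := out = make_prefix_kmer_table_alt seqs k
instance (seqs : List (String × String)) (k : Int) (out : List (String × List String)) : Decidable (Spec_make_prefix_kmer_table seqs k out) := by unfold Spec_make_prefix_kmer_table; infer_instance

-- ===== CLAIM (what is proved, stated in full; the proofs are below) =====
def Claim_equal_make_prefix_kmer_table : Prop := ∀ (seqs : List (String × String)) (k : Int), Dom_make_prefix_kmer_table seqs k → Spec_make_prefix_kmer_table seqs k (make_prefix_kmer_table seqs k)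

-- ===== LEMMAS AND PROOFS =====

-- a key that is absent looks up to the default
theorem getD_of_not_contains (d : PySem.Dict String (List String)) (k : String) (d0 : List String)
    (h : ¬ d.contains k = true) : d.getD k d0 = d0 := by
  rcases d with ⟨l⟩
  simp only [PySem.Dict.contains, List.any_eq_true, not_exists, not_and] at h
  simp only [PySem.Dict.getD, PySem.Dict.get?]
  rw [List.find?_eq_none.mpr (fun p hp => by simp [h p hp])]
  rfl

-- inserting twice at the same key is one insert of the last value
theorem insert_insert_self (d : PySem.Dict String (List String)) (k : String) (v w : List String) :
    (d.insert k v).insert k w = d.insert k w := by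
  rcases d with ⟨l⟩
  simp only [PySem.Dict.insert, PySem.Dict.contains]
  by_cases h : l.any (fun p => p.1 == k) = true
  · have h2 : ((List.map (fun p => if (p.1 == k) = true then (k, v) else p) l).any fun p => p.1 == k) = true := by
      simp only [List.any_eq_true] at h ⊢
      obtain ⟨p, hp, he⟩ := h
      exact ⟨(k, v), List.mem_map.mpr ⟨p, hp, by simp [he]⟩, by simp⟩
    simp only [h, if_pos, h2]
    congr 1
    rw [List.map_map]
    apply List.map_congr_left
    intro p hp
    by_cases hk : p.1 = k <;> simp [hk]
  · have hf : ∀ p ∈ l, (p.1 == k) = false := by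
      simp only [List.any_eq_true, not_exists, not_and] at h
      intro p hp; simpa using h p hp
    have h2 : ((l ++ [(k, v)]).any fun p => p.1 == k) = true := by simp
    simp only [h, Bool.false_eq_true, if_false, h2, if_pos]
    congr 1
    rw [List.map_append]
    have hmap : List.map (fun p => if (p.1 == k) = true then (k, w) else p) l = l :=
      (List.map_congr_left (fun p hp => by simp [hf p hp])).trans (List.map_id l)
    rw [hmap]
    simp

-- A's loop body is a single Dict.modify with the prefix as key
theorem stepA_eq_modify (k : Int) (d : PySem.Dict String (List String)) (nv : String × String) :
    (let kmer_first := PySem.Str.slice nv.2 (some 0) (some (0 + k))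
     let d' := if d.contains kmer_first then d else d.insert kmer_first PySem.Set.empty
     d'.insert kmer_first (PySem.Set.add (d'.getD kmer_first PySem.Set.empty) nv.1))
    = d.modify (PySem.Str.slice nv.2 (some 0) (some (0 + k))) PySem.Set.empty
        (fun s => PySem.Set.add s nv.1) := by
  set km := PySem.Str.slice nv.2 (some 0) (some (0 + k)) with hkm
  simp only [PySem.Dict.modify]
  by_cases h : d.contains km = true
  · simp [h]
  · simp only [h, Bool.false_eq_true, if_false]
    rw [PySem.Dict.getD_insert_self, insert_insert_self, getD_of_not_contains d km _ h]

-- getD of the modify-fold: the names whose key matches, folded in by Set.add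
theorem getD_foldl_modify_add (key : String × String → String)
    (L : List (String × String)) (d : PySem.Dict String (List String)) (p : String) :
    (L.foldl (fun d nv => d.modify (key nv) PySem.Set.empty (fun s => PySem.Set.add s nv.1)) d).getD p PySem.Set.empty
      = PySem.Set.update (d.getD p PySem.Set.empty) ((L.filter (fun nv => key nv == p)).map (fun nv => nv.1)) := by
  induction L generalizing d with
  | nil => simp [PySem.Set.update]
  | cons nv L ih =>
    simp only [List.foldl_cons, List.filter_cons]
    rw [ih]
    by_cases h : key nv = p
    · simp only [h, beq_self_eq_true, if_pos, List.map_cons]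
      rw [PySem.Dict.getD_modify]
      simp [PySem.Set.update]
    · have hb : (key nv == p) = false := by simp [h]
      simp only [hb, Bool.false_eq_true, if_false]
      rw [PySem.Dict.getD_modify, if_neg (fun he => h he.symm)]

-- a dict with Nodup keys is its key list paired with the looked-up values
theorem items_eq_keys_map_getD (d : PySem.Dict String (List String)) (h : d.keys.Nodup) :
    d.items = d.keys.map (fun p => (p, d.getD p PySem.Set.empty)) := by
  rcases d with ⟨l⟩
  simp only [PySem.Dict.keys] at h ⊢
  induction l with
  | nil => simp
  | cons q l ih =>
    simp only [List.map_cons, List.nodup_cons, List.mem_map] at h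
    obtain ⟨hq, hnd⟩ := h
    have hhead : (PySem.Dict.mk (q :: l)).getD q.1 PySem.Set.empty = q.2 := by
      simp [PySem.Dict.getD, PySem.Dict.get?]
    have htail : ∀ p ∈ List.map (fun x => x.1) l,
        (PySem.Dict.mk (q :: l)).getD p PySem.Set.empty = (PySem.Dict.mk l).getD p PySem.Set.empty := by
      intro p hp
      obtain ⟨a, ha, rfl⟩ := List.mem_map.mp hp
      have hne : (q.1 == a.1) = false := by
        simp only [beq_eq_false_iff_ne, ne_eq]
        intro he
        exact hq ⟨a, ha, he.symm⟩
      simp [PySem.Dict.getD, PySem.Dict.get?, hne]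
    simp only [List.map_cons]
    rw [List.cons_eq_cons]
    refine ⟨by rw [hhead], ?_⟩
    rw [List.map_congr_left (fun p hp => by rw [htail p hp]), ← ih hnd]

-- the two ports agree on every input
theorem make_prefix_kmer_table_eq (seqs : List (String × String)) (k : Int) :
    make_prefix_kmer_table seqs k = make_prefix_kmer_table_alt seqs k := by
  unfold make_prefix_kmer_table make_prefix_kmer_table_alt
  have hstep : (fun (table : PySem.Dict String (List String)) (nv : String × String) =>
      let kmer_first := PySem.Str.slice nv.2 (some 0) (some (0 + k))
      let table :=
        if table.contains kmer_first then table
        else table.insert kmer_first PySem.Set.empty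
      table.insert kmer_first (PySem.Set.add (table.getD kmer_first PySem.Set.empty) nv.1))
      = (fun d nv => d.modify (PySem.Str.slice nv.2 (some 0) (some (0 + k))) PySem.Set.empty
          (fun s => PySem.Set.add s nv.1)) :=
    funext fun d => funext fun nv => stepA_eq_modify k d nv
  rw [hstep]
  have hk : ∀ s : String, PySem.Str.slice s (some 0) (some (0 + k)) = PySem.Str.slice s (some 0) (some k) := by
    intro s; rw [Int.zero_add]
  set key : String × String → String := fun nv => PySem.Str.slice nv.2 (some 0) (some k) with hkey
  have hstep2 : (fun (d : PySem.Dict String (List String)) (nv : String × String) =>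
      d.modify (PySem.Str.slice nv.2 (some 0) (some (0 + k))) PySem.Set.empty (fun s => PySem.Set.add s nv.1))
      = (fun d nv => d.modify (key nv) PySem.Set.empty ((fun (_ : PySem.Dict String (List String)) (nv : String × String) => fun s => PySem.Set.add s nv.1) d nv)) := by
    funext d nv; rw [hk]
  rw [hstep2]
  have hkeys := PySem.Dict.keys_foldl_modify_key seqs key PySem.Set.empty
      (fun _ nv => fun s => PySem.Set.add s nv.1) PySem.Dict.empty
  have hkempty : (PySem.Dict.empty : PySem.Dict String (List String)).keys = [] := rfl
  rw [hkempty] at hkeys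
  have hupdate : ∀ xs : List String, PySem.Set.update ([] : PySem.Set String) xs = PySem.Set.ofList xs := by
    intro xs; rw [PySem.Set.ofList_eq_foldl]; rfl
  rw [hupdate] at hkeys
  have hnodup : (List.foldl (fun d nv => d.modify (key nv) PySem.Set.empty ((fun (_ : PySem.Dict String (List String)) (nv : String × String) => fun s => PySem.Set.add s nv.1) d nv)) PySem.Dict.empty seqs).keys.Nodup := by
    rw [hkeys]; exact PySem.Set.nodup_ofList _
  rw [items_eq_keys_map_getD _ hnodup, hkeys]
  have hdedup : PySem.List.dedup (seqs.map key) = PySem.Set.ofList (seqs.map key) := rfl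
  rw [hdedup]
  apply List.map_congr_left
  intro p hp
  rw [getD_foldl_modify_add key seqs PySem.Dict.empty p]
  have hupdate2 : ∀ xs : List String, PySem.Set.update (PySem.Set.empty : PySem.Set String) xs = PySem.Set.ofList xs := hupdate
  rw [PySem.Dict.getD_empty, hupdate2]

-- ===== VERDICT (by name: the statement is the Claim_ definition above) =====
theorem make_prefix_kmer_table_spec : Claim_equal_make_prefix_kmer_table := by
  intro seqs k _
  unfold Spec_make_prefix_kmer_table
  exact make_prefix_kmer_table_eq seqs k
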